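-- pv_equiv track=rewrite | github.com/datatags/CS453-All-Roads-Lead-to-McDonalds | dijkstras.algorithm.py | build_tree
-- ===== SOURCE A (Python) =====
-- def build_tree(T, r):
--     """Builds a dictionary representing the tree from the list of parents."""
--     n = len(T)
--     tree = {i: [] for i in range(n)}  # Create an empty list for each node
--     root = r
--
--     # Construct the tree
--     for child, parent in enumerate(T):
--         if parent != -1:
--             tree[parent].append(child)
--
--     return tree, root
--
-- r = 8430
-- ===== SOURCE B (Python) =====
-- def build_tree(T, r):
--     """Builds a dictionary representing the tree from the list of parents."""
--     n = len(T)
--     tree = {i: [c for c, p in enumerate(T) if p == i] for i in range(n)}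
--     return tree, r
-- ===== Notes on version B (the rewrite author's own statement) =====
-- stated objective: alternative
-- what changed: Replaces the single forward pass that appends each child to its parent's bucket with a per-node grouping comprehension that scans the parent list once per node.
import Mathlib
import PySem

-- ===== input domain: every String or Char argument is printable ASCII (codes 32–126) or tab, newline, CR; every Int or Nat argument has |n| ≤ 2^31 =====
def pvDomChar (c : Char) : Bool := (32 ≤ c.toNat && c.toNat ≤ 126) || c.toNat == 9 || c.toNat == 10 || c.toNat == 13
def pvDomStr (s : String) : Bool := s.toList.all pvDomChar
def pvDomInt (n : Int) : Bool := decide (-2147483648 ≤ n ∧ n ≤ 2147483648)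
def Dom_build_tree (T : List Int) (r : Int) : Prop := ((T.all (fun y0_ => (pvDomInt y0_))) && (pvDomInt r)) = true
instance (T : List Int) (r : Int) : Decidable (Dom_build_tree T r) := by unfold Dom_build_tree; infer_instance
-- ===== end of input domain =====

-- B replaces A's single appending pass over (child, parent) pairs by a per-node grouping
-- comprehension (one scan of T per node); same value, different decomposition, not faster.

-- ===== PORT A =====
-- {i: [] for i in range(n)}: comprehension keys are distinct, so the dict is the pair list itself.
-- tree[parent].append(child) raises KeyError when parent is not a key; that input is outside
-- Pre_build_tree (the port's Dict.modify would insert a fresh key there instead).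
def build_tree (T : List Int) (r : Int) : (List (Int × List Int)) × Int :=
  let n : Int := T.length
  let tree : PySem.Dict Int (List Int) :=
    PySem.Dict.mk ((PySem.List.pyRange 0 n 1).map (fun i => (i, ([] : List Int))))
  let root := r
  let tree :=
    (PySem.List.enumerate T 0).foldl
      (fun d cp => if cp.2 ≠ -1 then d.modify cp.2 [] (fun L => L ++ [cp.1]) else d) tree
  (tree.items, root)

-- ===== PORT B =====
def build_tree_alt (T : List Int) (r : Int) : (List (Int × List Int)) × Int :=
  ((PySem.List.pyRange 0 (T.length : Int) 1).map (fun i =>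
      (i, ((PySem.List.enumerate T 0).filter (fun cp => cp.2 == i)).map (fun cp => cp.1))), r)

-- ===== PRECONDITION & SPEC =====
-- Pre_ excludes inputs where some parent value is neither -1 nor an index in range(len(T)):
-- there A raises KeyError.
def Pre_build_tree (T : List Int) (r : Int) : Prop :=
  ∀ p ∈ T, p = -1 ∨ (0 ≤ p ∧ p < (T.length : Int))
instance (T : List Int) (r : Int) : Decidable (Pre_build_tree T r) := by
  unfold Pre_build_tree; infer_instance
def pvWitness_build_tree : List Int × Int := ([-1, 0, 0, 1], 8430)

def Spec_build_tree (T : List Int) (r : Int) (out : (List (Int × List Int)) × Int) : Prop := out = build_tree_alt T r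
instance (T : List Int) (r : Int) (out : (List (Int × List Int)) × Int) : Decidable (Spec_build_tree T r out) := by unfold Spec_build_tree; infer_instance

-- ===== CLAIM (what is proved, stated in full; the proofs are below) =====
def Claim_equal_build_tree : Prop := ∀ (T : List Int) (r : Int), Dom_build_tree T r → Pre_build_tree T r → Spec_build_tree T r (build_tree T r)

-- ===== LEMMAS AND PROOFS =====

-- The guarded loop equals the unguarded modify-loop over the entries with parent ≠ -1.
theorem foldl_guard (l : List (Int × Int)) (d : PySem.Dict Int (List Int)) :
    l.foldl (fun d cp => if cp.2 ≠ -1 then d.modify cp.2 [] (fun L => L ++ [cp.1]) else d) d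
      = (l.filter (fun cp => cp.2 != -1)).foldl
          (fun d cp => d.modify cp.2 [] (fun L => L ++ [cp.1])) d := by
  induction l generalizing d with
  | nil => rfl
  | cons hd tl ih =>
    rw [List.foldl_cons, List.filter_cons]
    by_cases h : hd.2 = -1
    · simp only [h, ne_eq, not_true_eq_false, if_false, bne_self_eq_false, if_neg,
        Bool.false_eq_true, not_false_eq_true]
      exact ih d
    · simp only [h, ne_eq, not_false_eq_true, if_true, bne_iff_ne, if_pos, List.foldl_cons]
      exact ih _

-- Each bucket of the modify-loop collects, in order, the children whose parent equals the key.
theorem getD_fold (l : List (Int × Int)) (d : PySem.Dict Int (List Int)) (c : Int) :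
    (l.foldl (fun d cp => d.modify cp.2 [] (fun L => L ++ [cp.1])) d).getD c []
      = d.getD c [] ++ (l.filter (fun cp => cp.2 == c)).map (fun cp => cp.1) := by
  induction l generalizing d with
  | nil => simp
  | cons hd tl ih =>
    rw [List.foldl_cons, ih, PySem.Dict.getD_modify, List.filter_cons]
    by_cases h : hd.2 = c
    · subst h
      simp
    · have h' : ¬ c = hd.2 := fun hh => h hh.symm
      simp [h, h']

theorem set_update_of_subset (s : PySem.Set Int) (l : List Int)
    (h : ∀ x ∈ l, x ∈ s) : PySem.Set.update s l = s := by
  induction l generalizing s with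
  | nil => rfl
  | cons hd tl ih =>
    have hhd : hd ∈ s := h hd (by simp)
    have : PySem.Set.add s hd = s := by
      simp [PySem.Set.add, PySem.Set.contains, hhd]
    simp only [PySem.Set.update, List.foldl_cons]
    rw [show List.foldl PySem.Set.add (PySem.Set.add s hd) tl
          = PySem.Set.update (PySem.Set.add s hd) tl from rfl, this]
    exact ih s (fun x hx => h x (by simp [hx]))

-- ===== VERDICT (by name: the statement is the Claim_ definition above) =====
theorem build_tree_spec : Claim_equal_build_tree := by
  intro T r _ hpre
  show build_tree T r = build_tree_alt T r
  unfold build_tree build_tree_alt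
  simp only []
  rw [foldl_guard]
  simp only [Prod.mk.injEq, and_true]
  set l := PySem.List.enumerate T 0 with hl
  set lf := l.filter (fun cp => cp.2 != -1) with hlf
  set init : PySem.Dict Int (List Int) :=
    PySem.Dict.mk ((PySem.List.pyRange 0 (T.length : Int) 1).map (fun i => (i, ([] : List Int)))) with hinit
  have hk0 : init.keys = PySem.List.pyRange 0 (T.length : Int) 1 := by
    simp [hinit, PySem.Dict.keys_mk, List.map_map, Function.comp_def]
  have hmemT : ∀ cp ∈ l, cp.2 ∈ T := by
    intro cp hcp
    rw [hl, PySem.List.mem_enumerate_iff] at hcp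
    obtain ⟨k, hk, rfl⟩ := hcp
    exact List.getElem_mem hk
  have hkeys : (lf.foldl (fun d cp => d.modify cp.2 [] (fun L => L ++ [cp.1])) init).keys = init.keys := by
    rw [PySem.Dict.keys_foldl_modify_key]
    apply set_update_of_subset
    intro x hx
    rw [List.mem_map] at hx
    obtain ⟨cp, hcp, rfl⟩ := hx
    rw [hlf, List.mem_filter] at hcp
    obtain ⟨hcpl, hne⟩ := hcp
    have hne' : cp.2 ≠ -1 := by simpa using hne
    rcases hpre cp.2 (hmemT cp hcpl) with h | ⟨h1, h2⟩
    · exact absurd h hne'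
    · rw [hk0, PySem.List.mem_pyRange_one]; exact ⟨h1, h2⟩
  have hnd : (lf.foldl (fun d cp => d.modify cp.2 [] (fun L => L ++ [cp.1])) init).keys.Nodup := by
    apply PySem.Dict.nodup_keys_foldl_modify_key
    rw [hk0]; exact PySem.List.nodup_pyRange_one _ _
  rw [PySem.Dict.items_eq_map_keys _ hnd ([] : List Int), hkeys, hk0]
  apply List.map_congr_left
  intro k hk
  have hk' : 0 ≤ k ∧ k < (T.length : Int) := (PySem.List.mem_pyRange_one).1 hk
  have hinitk : init.getD k [] = [] := by
    apply PySem.Dict.getD_of_mem_items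
    · exact List.mem_map.2 ⟨k, hk, rfl⟩
    · rw [hk0]; exact PySem.List.nodup_pyRange_one _ _
  rw [getD_fold, hinitk, List.nil_append]
  have hfil : lf.filter (fun cp => cp.2 == k) = l.filter (fun cp => cp.2 == k) := by
    rw [hlf, List.filter_filter]
    apply List.filter_congr
    intro cp _
    by_cases h : cp.2 = k
    · have hkne : k ≠ -1 := by omega
      simp [h, hkne]
    · simp [h]
  rw [hfil]
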